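-- pv_equiv track=rewrite | github.com/nesaboz/solar | pycode/catogorize.py | create_matrix_from_list
-- ===== SOURCE A (Python) =====
-- def create_matrix_from_list(n, m):
--     """
--     Takes an array of length n and chops it into segments of max length of m.
--     Used for image stitching.
--
--     For example n=10 and m=3 gives [[0,1,2], [3,4,5], [6,7,8], [10]]
--
--     Args:
--         n (int): number of indices.
--         m (int): max length of subarray.
--
--     Returns:
--         list(list): List of chopped segments.
--
--     """
--     result = []
--     current_row = []
--     for counter in range(n):
--         if counter > 0 and counter % m == 0:
--             result.append(current_row)
--             current_row = []
--         current_row.append(counter)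
--
--     if current_row:
--         result.append(current_row)
--
--     return result
-- ===== SOURCE B (Python) =====
-- def create_matrix_from_list(n, m):
--     return [list(range(i, min(i + m, n))) for i in range(0, n, m)]
-- ===== Notes on version B (the rewrite author's own statement) =====
-- stated objective: idiomatic
-- what changed: Replaces the element-by-element loop with a running row and a modulo boundary test by a single comprehension that strides over the chunk start indices and materialises each chunk directly as a range (constant-factor speedup: C-level range construction instead of per-element appends).
-- outside the precondition, e.g. on create_matrix_from_list(1, 0): A returns [[0]], B raises ValueError; on create_matrix_from_list(5, -2): A returns [[0, 1], [2, 3], [4]], B returns []; on create_matrix_from_list(-5, -2): A returns [], B returns [[], [], []]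
import Mathlib
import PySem

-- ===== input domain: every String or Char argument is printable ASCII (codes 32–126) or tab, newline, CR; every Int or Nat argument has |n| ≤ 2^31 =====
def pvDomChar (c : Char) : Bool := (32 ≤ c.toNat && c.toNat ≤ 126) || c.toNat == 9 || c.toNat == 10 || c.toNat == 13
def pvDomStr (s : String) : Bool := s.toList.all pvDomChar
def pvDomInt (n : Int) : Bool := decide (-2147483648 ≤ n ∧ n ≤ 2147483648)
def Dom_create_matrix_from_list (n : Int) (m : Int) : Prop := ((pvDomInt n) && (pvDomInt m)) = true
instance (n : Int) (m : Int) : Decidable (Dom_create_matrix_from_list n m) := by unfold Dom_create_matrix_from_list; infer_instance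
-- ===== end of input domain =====

-- B computes the chunks by striding over the start indices (one comprehension over range(0,n,m))
-- instead of A's element loop with a running row flushed on a modulo test; more idiomatic (return-value equivalence proved on Pre_).

-- ===== PORT A =====
-- the body of A's 'for counter in range(n)' loop, and the trailing 'if current_row: append' step
def pvStepA (m : Int) (s : List (List Int) × List Int) (counter : Int) :
    List (List Int) × List Int :=
  let s' := if counter > 0 ∧ PySem.Int.mod counter m = 0 then (s.1 ++ [s.2], ([] : List Int)) else s
  (s'.1, s'.2 ++ [counter])

def pvFinishA (st : List (List Int) × List Int) : List (List Int) :=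
  if st.2 ≠ [] then st.1 ++ [st.2] else st.1

def create_matrix_from_list (n : Int) (m : Int) : List (List Int) :=
  pvFinishA ((PySem.List.pyRange 0 n 1).foldl (pvStepA m) ([], []))

-- ===== PORT B =====
def create_matrix_from_list_alt (n : Int) (m : Int) : List (List Int) :=
  (PySem.List.pyRange 0 n m).map (fun i => PySem.List.pyRange i (min (i + m) n) 1)

-- ===== PRECONDITION & SPEC =====
-- Pre_ excludes non-positive m (except the trivial n = 0): at m == 0 A raises ZeroDivisionError for
-- n ≥ 2 while B raises ValueError, and for negative m A's |m|-based chunking (empty for negative n)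
-- and B's empty / empty-chunk results are both accidents of their mechanisms on a corner no caller specifies.
def Pre_create_matrix_from_list (n : Int) (m : Int) : Prop := 1 ≤ m ∨ (n = 0 ∧ m ≠ 0)
instance (n : Int) (m : Int) : Decidable (Pre_create_matrix_from_list n m) := by
  unfold Pre_create_matrix_from_list; infer_instance

def pvWitness_create_matrix_from_list : Int × Int := (10, 3)

def Spec_create_matrix_from_list (n : Int) (m : Int) (out : List (List Int)) : Prop := out = create_matrix_from_list_alt n m
instance (n : Int) (m : Int) (out : List (List Int)) : Decidable (Spec_create_matrix_from_list n m out) := by unfold Spec_create_matrix_from_list; infer_instance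

-- ===== CLAIM (what is proved, stated in full; the proofs are below) =====
def Claim_equal_create_matrix_from_list : Prop := ∀ (n : Int) (m : Int), Dom_create_matrix_from_list n m → Pre_create_matrix_from_list n m → Spec_create_matrix_from_list n m (create_matrix_from_list n m)

-- ===== LEMMAS AND PROOFS =====

-- positive-step range: empty when the bounds are empty
lemma pyRange_pos_nil {m : Int} (hm : 0 < m) {a b : Int} (h : b ≤ a) :
    PySem.List.pyRange a b m = [] := by
  rw [PySem.List.pyRange_of_pos a b hm]
  simp [show ¬ a < b by omega]

-- positive-step range: peel the first start index
lemma pyRange_pos_cons {m : Int} (hm : 0 < m) {a b : Int} (h : a < b) :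
    PySem.List.pyRange a b m = a :: PySem.List.pyRange (a + m) b m := by
  rw [PySem.List.pyRange_of_pos a b hm, PySem.List.pyRange_of_pos (a + m) b hm]
  by_cases hab : a + m < b
  · have hshift : b - a + m - 1 = (b - (a + m) + m - 1) + 1 * m := by ring
    have hstep : (b - a + m - 1) / m = (b - (a + m) + m - 1) / m + 1 := by
      rw [hshift, Int.add_mul_ediv_right _ _ (by omega : m ≠ 0)]
    have hnn : 0 ≤ (b - (a + m) + m - 1) / m := by
      apply Int.ediv_nonneg <;> omega
    rw [if_pos h, if_pos hab, hstep,
      show ((b - (a + m) + m - 1) / m + 1).toNat = ((b - (a + m) + m - 1) / m).toNat + 1 by omega,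
      List.range_succ_eq_map, List.map_cons, List.map_map]
    congr 1
    · simp
    · apply List.map_congr_left
      intro k _
      simp only [Function.comp_apply, Nat.succ_eq_add_one]
      push_cast
      ring
  · -- exactly one chunk start remains
    have h1 : (b - a + m - 1) / m = 1 := by
      rw [show b - a + m - 1 = (b - a - 1) + 1 * m by ring,
        Int.add_mul_ediv_right _ _ (by omega : m ≠ 0),
        Int.ediv_eq_zero_of_lt (by omega) (by omega)]
      norm_num
    rw [if_pos h, if_neg hab, h1]
    simp

-- A's loop, started just after a chunk boundary, produces exactly B's remaining chunks
lemma loopA_chunks {m : Int} (hm : 0 < m) :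
    ∀ (fuel : Nat) (n c j : Int) (res : List (List Int)),
      (n - j).toNat = fuel → m ∣ c → 0 ≤ c → c < j → j ≤ n → j ≤ c + m →
      pvFinishA ((PySem.List.pyRange j n 1).foldl (pvStepA m) (res, PySem.List.pyRange c j 1))
        = res ++ (PySem.List.pyRange c n m).map (fun i => PySem.List.pyRange i (min (i + m) n) 1) := by
  intro fuel
  induction fuel with
  | zero =>
    intro n c j res hfuel hdvd hc hcj hjn hjm
    have hjn' : j = n := by omega
    subst hjn'
    rw [PySem.List.pyRange_one_eq_nil (le_refl j), List.foldl_nil]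
    have hrow : PySem.List.pyRange c j 1 ≠ [] := by
      rw [PySem.List.pyRange_one_cons hcj]; simp
    rw [pvFinishA, if_pos hrow]
    rw [pyRange_pos_cons hm hcj, pyRange_pos_nil hm (by omega : j ≤ c + m)]
    simp [min_eq_right hjm]
  | succ fuel ih =>
    intro n c j res hfuel hdvd hc hcj hjn hjm
    have hjn' : j < n := by omega
    rw [PySem.List.pyRange_one_cons hjn', List.foldl_cons]
    by_cases hflush : j = c + m
    · -- counter j starts a new chunk: A flushes the current row
      have hj0 : (0:Int) < j := by omega
      have hdj : m ∣ j := by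
        rcases hdvd with ⟨q, hq⟩
        exact ⟨q + 1, by rw [hflush, hq]; ring⟩
      have hmod : PySem.Int.mod j m = 0 := (PySem.Int.mod_eq_zero_iff_dvd j m).mpr hdj
      have hstep : pvStepA m (res, PySem.List.pyRange c j 1) j
          = (res ++ [PySem.List.pyRange c j 1], PySem.List.pyRange j (j + 1) 1) := by
        simp [pvStepA, hj0, hmod, PySem.List.pyRange_one_singleton]
      rw [hstep,
        ih n j (j + 1) (res ++ [PySem.List.pyRange c j 1]) (by omega) hdj (by omega)
          (by omega) (by omega) (by omega)]
      rw [pyRange_pos_cons hm (by omega : c < n), List.map_cons,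
        show min (c + m) n = c + m by omega, ← hflush]
      simp [List.append_assoc]
    · -- counter j stays in the current chunk
      have hnoflush : ¬ (j > 0 ∧ PySem.Int.mod j m = 0) := by
        rintro ⟨hj0, hmod⟩
        have hdj : m ∣ j := (PySem.Int.mod_eq_zero_iff_dvd j m).mp hmod
        have hd : m ∣ (j - c) := dvd_sub hdj hdvd
        have hle : m ≤ j - c := Int.le_of_dvd (by omega) hd
        omega
      have hstep : pvStepA m (res, PySem.List.pyRange c j 1) j
          = (res, PySem.List.pyRange c (j + 1) 1) := by
        simp only [pvStepA, if_neg hnoflush]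
        rw [PySem.List.pyRange_one_succ_right (by omega : c ≤ j)]
      rw [hstep,
        ih n c (j + 1) res (by omega) hdvd hc (by omega) (by omega) (by omega)]

-- ===== VERDICT (by name: the statement is the Claim_ definition above) =====
theorem create_matrix_from_list_spec : Claim_equal_create_matrix_from_list := by
  intro n m _ hpre
  unfold Spec_create_matrix_from_list create_matrix_from_list create_matrix_from_list_alt
  rcases hpre with hm | ⟨hn0, _⟩
  · by_cases hn : 1 ≤ n
    · -- peel counter 0, which never flushes, then run the chunk lemma
      rw [PySem.List.pyRange_one_cons (by omega : (0:Int) < n), List.foldl_cons]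
      have hstep0 : pvStepA m ([], []) 0 = ([], PySem.List.pyRange 0 1 1) := by
        have h01 : PySem.List.pyRange 0 1 1 = [0] := by decide
        simp [pvStepA, h01]
      rw [hstep0]
      have := loopA_chunks (by omega : 0 < m) (n - 1).toNat n 0 1 [] (by omega)
        ⟨0, by ring⟩ (by omega) (by omega) (by omega) (by omega)
      simpa using this
    · -- n ≤ 0: both sides are empty
      rw [PySem.List.pyRange_one_eq_nil (by omega), pyRange_pos_nil (by omega : 0 < m) (by omega)]
      simp [pvFinishA]
  · -- n = 0: both sides are empty for any m
    subst hn0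
    rw [PySem.List.pyRange_one_eq_nil (by omega)]
    simp [pvFinishA, PySem.List.pyRange]
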